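-- pv_equiv track=rewrite | github.com/motacola/PandocPro | docs/marp-slides-prototype/generate_marp_deck.py | pick_sentences
-- ===== SOURCE A (Python) =====
-- def pick_sentences(sentences, terms, limit=5):
--     scored = []
--     for s in sentences:
--         score = sum(1 for t in terms if t in s.lower())
--         scored.append((score, len(s), s))
--     ranked = sorted(scored, key=lambda x: (-x[0], x[1]))
--     chosen = []
--     seen = set()
--     for _, _, s in ranked:
--         key = s.lower()
--         if key in seen:
--             continue
--         seen.add(key)
--         chosen.append(s)
--         if len(chosen) >= limit:
--             break
--     return chosen
-- ===== SOURCE B (Python) =====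
-- def pick_sentences(sentences, terms, limit=5):
--     # Top-k by repeated selection instead of sorting: dedup by lowercase (keep first
--     # occurrence) while scoring, then repeatedly extract the best remaining sentence
--     # (minimal (-score, len), earliest on ties) up to `limit` times. No sort at all.
--     pool = []
--     seen = set()
--     for s in sentences:
--         k = s.lower()
--         if k not in seen:
--             seen.add(k)
--             pool.append((sum(1 for t in terms if t in k), len(s), s))
--     chosen = []
--     while pool:
--         m = pool[0]
--         for x in pool:
--             if (-x[0], x[1]) < (-m[0], m[1]):
--                 m = x
--         pool.remove(m)
--         chosen.append(m[2])
--         if len(chosen) >= limit: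
--             break
--     return chosen
-- ===== Notes on version B (the rewrite author's own statement) =====
-- stated objective: alternative
-- what changed: B never sorts: it deduplicates by lowercase while scoring in one pass, then returns the top-k by repeated selection (scan for the best remaining sentence and remove it, up to limit times) instead of A's sort-everything-then-dedup-while-emitting.
import Mathlib
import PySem

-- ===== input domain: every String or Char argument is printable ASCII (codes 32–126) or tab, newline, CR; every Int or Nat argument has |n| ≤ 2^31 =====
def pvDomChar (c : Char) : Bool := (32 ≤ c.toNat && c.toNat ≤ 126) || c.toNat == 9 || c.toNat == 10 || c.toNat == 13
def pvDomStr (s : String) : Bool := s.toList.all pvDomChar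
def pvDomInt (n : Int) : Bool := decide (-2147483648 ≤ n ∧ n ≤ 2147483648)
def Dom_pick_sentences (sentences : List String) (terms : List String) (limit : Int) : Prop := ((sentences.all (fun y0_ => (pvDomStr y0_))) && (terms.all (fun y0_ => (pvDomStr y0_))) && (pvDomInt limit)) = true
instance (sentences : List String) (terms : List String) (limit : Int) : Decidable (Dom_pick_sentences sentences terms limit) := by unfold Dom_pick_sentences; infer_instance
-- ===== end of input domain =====

-- B never sorts: it deduplicates by lowercase while scoring in one pass, then takes the
-- top `limit` sentences by repeated selection (scan for the best remaining, remove it);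
-- A scores everything, sorts it all, and deduplicates while emitting.

-- ===== PORT A =====
-- A's emission loop: dedup by lowercased sentence, stop once `limit` are chosen (break AFTER appending).
def pickA_loop : List (Int × Int × String) → PySem.Set String → List String → Int → List String
  | [], _, chosen, _ => chosen
  | (_, _, s) :: rest, seen, chosen, limit =>
    let key := PySem.Str.lower s
    if PySem.Set.contains seen key then pickA_loop rest seen chosen limit
    else
      let seen' := PySem.Set.add seen key
      let chosen' := chosen ++ [s]
      if limit ≤ (chosen'.length : Int) then chosen'
      else pickA_loop rest seen' chosen' limit

def pick_sentences (sentences : List String) (terms : List String) (limit : Int) : List String :=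
  let scored := sentences.foldl (fun acc s =>
      acc ++ [(terms.foldl (fun n t => if PySem.Str.isIn t (PySem.Str.lower s) then n + 1 else n) (0 : Int),
               PySem.Str.len s, s)]) []
  let ranked := PySem.List.sorted2 scored (fun x => -x.1) (fun x => x.2.1)
  pickA_loop ranked PySem.Set.empty [] limit

-- ===== PORT B =====
-- Python tuple comparison (-x[0], x[1]) < (-m[0], m[1]) (lexicographic on two ints)
def pyLt2 (a b : Int × Int × String) : Bool :=
  decide (-a.1 < -b.1) || (decide (-a.1 = -b.1) && decide (a.2.1 < b.2.1))

-- the scanned minimum of B's inner `for x in pool` loop is a member of the pool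
-- (cited by selLoopB's termination proof: pool.remove(m) shortens the pool)
theorem pyMin_mem : ∀ (xs : List (Int × Int × String)) (x : Int × Int × String),
    xs.foldl (fun b y => if pyLt2 y b then y else b) x ∈ x :: xs := by
  intro xs
  induction xs with
  | nil => intro x; simp
  | cons y ys ih =>
    intro x
    simp only [List.foldl_cons]
    by_cases h : pyLt2 y x = true
    · rw [if_pos h]
      have := ih y
      rcases List.mem_cons.1 this with h' | h'
      · rw [h']; exact List.mem_cons_of_mem _ List.mem_cons_self
      · exact List.mem_cons_of_mem _ (List.mem_cons_of_mem _ h')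
    · rw [if_neg h]
      have := ih x
      rcases List.mem_cons.1 this with h' | h'
      · rw [h']; exact List.mem_cons_self
      · exact List.mem_cons_of_mem _ (List.mem_cons_of_mem _ h')

-- B's `while pool:` loop: scan for the best remaining tuple, remove it, emit its sentence,
-- stop once `limit` are chosen (break AFTER appending, like the Python).
def selLoopB : List (Int × Int × String) → List String → Int → List String
  | [], chosen, _ => chosen
  | x :: xs, chosen, limit =>
    let m := (x :: xs).foldl (fun b y => if pyLt2 y b then y else b) x
    let pool' := (x :: xs).erase m
    let chosen' := chosen ++ [m.2.2]
    if limit ≤ (chosen'.length : Int) then chosen'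
    else selLoopB pool' chosen' limit
termination_by pool _ _ => pool.length
decreasing_by
  have hm : (x :: xs).foldl (fun b y => if pyLt2 y b then y else b) x ∈ x :: x :: xs :=
    pyMin_mem (x :: xs) x
  rcases List.mem_cons.1 hm with h | h
  · have : ((x :: xs).erase ((x :: xs).foldl (fun b y => if pyLt2 y b then y else b) x)).length
        = (x :: xs).length - 1 := List.length_erase_of_mem (by rw [h]; exact List.mem_cons_self)
    simp_all
  · have : ((x :: xs).erase ((x :: xs).foldl (fun b y => if pyLt2 y b then y else b) x)).length
        = (x :: xs).length - 1 := List.length_erase_of_mem h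
    simp_all

def pick_sentences_alt (sentences : List String) (terms : List String) (limit : Int) : List String :=
  let st := sentences.foldl (fun (st : PySem.Set String × List (Int × Int × String)) s =>
      let k := PySem.Str.lower s
      if PySem.Set.contains st.1 k then st
      else (PySem.Set.add st.1 k,
            st.2 ++ [(terms.foldl (fun n t => if PySem.Str.isIn t k then n + 1 else n) (0 : Int),
                      PySem.Str.len s, s)])) (PySem.Set.empty, [])
  selLoopB st.2 [] limit

-- ===== PRECONDITION & SPEC =====
def Spec_pick_sentences (sentences : List String) (terms : List String) (limit : Int) (out : List String) : Prop := out = pick_sentences_alt sentences terms limit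
instance (sentences : List String) (terms : List String) (limit : Int) (out : List String) : Decidable (Spec_pick_sentences sentences terms limit out) := by unfold Spec_pick_sentences; infer_instance

-- ===== CLAIM (what is proved, stated in full; the proofs are below) =====
def Claim_equal_pick_sentences : Prop := ∀ (sentences : List String) (terms : List String) (limit : Int), Dom_pick_sentences sentences terms limit → Spec_pick_sentences sentences terms limit (pick_sentences sentences terms limit)

-- ===== LEMMAS AND PROOFS =====

-- the dedup key of a scored tuple
def kf (x : Int × Int × String) : String := PySem.Str.lower x.2.2

-- the comparison sorted2 uses for key (-score, len)
def bf (a b : Int × Int × String) : Bool :=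
  decide (-a.1 < -b.1) || (!decide (-b.1 < -a.1) && decide (a.2.1 < b.2.1))

lemma pyLt2_eq_bf (a b : Int × Int × String) : pyLt2 a b = bf a b := by
  simp only [pyLt2, bf]
  by_cases h1 : -a.1 < -b.1
  · simp [h1]
  · by_cases h2 : -b.1 < -a.1
    · have : ¬ (-a.1 = -b.1) := by omega
      simp [h1, h2, this]
    · have : -a.1 = -b.1 := by omega
      simp [this]

-- dedup by key with an explicit seen list (proof-side model of the seen-sets)
def dK : List (Int × Int × String) → List String → List (Int × Int × String)
  | [], _ => []
  | x :: l, seen => if kf x ∈ seen then dK l seen else x :: dK l (kf x :: seen)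

def sortF (xs : List (Int × Int × String)) : List (Int × Int × String) :=
  xs.foldl (fun acc x => PySem.List.insertBy bf x acc) []

def tupOf (terms : List String) (s : String) : Int × Int × String :=
  (terms.foldl (fun n t => if PySem.Str.isIn t (PySem.Str.lower s) then n + 1 else n) (0 : Int),
   PySem.Str.len s, s)

-- A's ranked emission, replayed on an already-deduplicated list (intermediate model)
def pickB_loop : List (Int × Int × String) → List String → Int → List String
  | [], chosen, _ => chosen
  | (_, _, s) :: rest, chosen, limit =>
    let chosen' := chosen ++ [s]
    if limit ≤ (chosen'.length : Int) then chosen'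
    else pickB_loop rest chosen' limit

-- bf facts
lemma bf_asymm {a b : Int × Int × String} (h : bf a b = true) : bf b a = false := by
  simp [bf] at h ⊢
  omega

lemma bf_trans {a b c : Int × Int × String} (h1 : bf a b = true) (h2 : bf b c = true) :
    bf a c = true := by
  simp [bf] at h1 h2 ⊢
  omega

lemma bf_lt_of_lt_of_not_lt {x y z : Int × Int × String} (h1 : bf x y = true)
    (h2 : bf z y = false) : bf x z = true := by
  simp [bf] at h1 h2 ⊢
  omega

lemma bf_congr_right {a b c : Int × Int × String} (h1 : b.1 = c.1) (h2 : b.2.1 = c.2.1) :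
    bf a b = bf a c := by
  simp only [bf, h1, h2]

lemma bf_self_false {a b : Int × Int × String} (h1 : a.1 = b.1) (h2 : a.2.1 = b.2.1) :
    bf a b = false := by
  simp [bf, h1, h2]

-- sorted2 with these keys IS the fold of insertBy bf
lemma sorted2_eq_sortF (xs : List (Int × Int × String)) :
    PySem.List.sorted2 xs (fun x => -x.1) (fun x => x.2.1) = sortF xs := rfl

-- equations
lemma insertBy_nil (x : Int × Int × String) : PySem.List.insertBy bf x [] = [x] := rfl

lemma insertBy_cons (x y : Int × Int × String) (ys : List (Int × Int × String)) :
    PySem.List.insertBy bf x (y :: ys) =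
      if bf x y then x :: y :: ys else y :: PySem.List.insertBy bf x ys := rfl

lemma dK_nil (seen : List String) : dK [] seen = [] := rfl

lemma dK_cons (x : Int × Int × String) (l : List (Int × Int × String)) (seen : List String) :
    dK (x :: l) seen = if kf x ∈ seen then dK l seen else x :: dK l (kf x :: seen) := rfl

-- sortedness invariant of the fold
lemma insertBy_pairwise {x : Int × Int × String} {ys : List (Int × Int × String)}
    (h : ys.Pairwise (fun a b => bf b a = false)) :
    (PySem.List.insertBy bf x ys).Pairwise (fun a b => bf b a = false) := by
  induction ys with
  | nil => simp [insertBy_nil]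
  | cons y ys ih =>
    rcases List.pairwise_cons.1 h with ⟨hy, hys⟩
    rw [insertBy_cons]
    by_cases hxy : bf x y = true
    · rw [if_pos hxy]
      refine List.pairwise_cons.2 ⟨?_, h⟩
      intro z hz
      rcases List.mem_cons.1 hz with rfl | hz'
      · exact bf_asymm hxy
      · by_cases hzx : bf z x = true
        · exfalso
          have h3 := bf_trans hzx hxy
          rw [hy z hz'] at h3
          exact Bool.false_ne_true h3
        · simpa using hzx
    · rw [if_neg hxy]
      refine List.pairwise_cons.2 ⟨?_, ih hys⟩
      intro z hz
      rcases (PySem.List.mem_insertBy _ _ _ _).1 hz with rfl | hz'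
      · simpa using hxy
      · exact hy z hz'

lemma sortF_pairwise_aux (l : List (Int × Int × String)) :
    ∀ acc : List (Int × Int × String), acc.Pairwise (fun a b => bf b a = false) →
      (l.foldl (fun acc x => PySem.List.insertBy bf x acc) acc).Pairwise
        (fun a b => bf b a = false) := by
  induction l with
  | nil => intro acc h; simpa using h
  | cons x l ih => intro acc h; exact ih _ (insertBy_pairwise h)

lemma sortF_pairwise (xs : List (Int × Int × String)) :
    (sortF xs).Pairwise (fun a b => bf b a = false) :=
  sortF_pairwise_aux xs [] (by simp)

lemma mem_foldl_insertBy (l : List (Int × Int × String)) :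
    ∀ (acc : List (Int × Int × String)) (z : Int × Int × String),
      z ∈ l.foldl (fun acc x => PySem.List.insertBy bf x acc) acc ↔ z ∈ l ∨ z ∈ acc := by
  induction l with
  | nil => intro acc z; simp
  | cons x l ih =>
    intro acc z
    simp only [List.foldl_cons, ih, PySem.List.mem_insertBy, List.mem_cons]
    tauto

lemma mem_sortF {xs : List (Int × Int × String)} {z : Int × Int × String} :
    z ∈ sortF xs ↔ z ∈ xs := by
  simp [sortF, mem_foldl_insertBy]

lemma sortF_append (xs : List (Int × Int × String)) (x : Int × Int × String) :
    sortF (xs ++ [x]) = PySem.List.insertBy bf x (sortF xs) := by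
  simp [sortF, List.foldl_append]

-- dK facts
lemma dK_mem {l : List (Int × Int × String)} {seen : List String}
    {z : Int × Int × String} (h : z ∈ dK l seen) : z ∈ l := by
  induction l generalizing seen with
  | nil => rw [dK_nil] at h; exact absurd h (List.not_mem_nil)
  | cons x l ih =>
    by_cases hx : kf x ∈ seen
    · rw [dK_cons, if_pos hx] at h
      exact List.mem_cons_of_mem _ (ih h)
    · rw [dK_cons, if_neg hx] at h
      rcases List.mem_cons.1 h with rfl | h'
      · exact List.mem_cons_self
      · exact List.mem_cons_of_mem _ (ih h')

lemma dK_congr_seen {l : List (Int × Int × String)} :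
    ∀ {s s' : List String}, (∀ a, a ∈ s ↔ a ∈ s') → dK l s = dK l s' := by
  induction l with
  | nil => intro s s' _; rfl
  | cons x l ih =>
    intro s s' h
    by_cases hx : kf x ∈ s
    · rw [dK_cons, if_pos hx, dK_cons, if_pos ((h _).1 hx)]
      exact ih h
    · rw [dK_cons, if_neg hx, dK_cons, if_neg (fun c => hx ((h _).2 c))]
      refine congrArg _ (ih ?_)
      intro a
      simp only [List.mem_cons]
      constructor
      · rintro (rfl | hh)
        · exact Or.inl rfl
        · exact Or.inr ((h a).1 hh)
      · rintro (rfl | hh)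
        · exact Or.inl rfl
        · exact Or.inr ((h a).2 hh)

lemma dK_add_fresh {l : List (Int × Int × String)} {a : String}
    (h : ∀ y ∈ l, kf y ≠ a) : ∀ s : List String, dK l (a :: s) = dK l s := by
  induction l with
  | nil => intro s; rfl
  | cons x l ih =>
    intro s
    have hxa : kf x ≠ a := h x List.mem_cons_self
    have htail : ∀ y ∈ l, kf y ≠ a := fun y hy => h y (List.mem_cons_of_mem _ hy)
    by_cases hx : kf x ∈ s
    · rw [dK_cons, if_pos (List.mem_cons_of_mem _ hx), dK_cons, if_pos hx]
      exact ih htail s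
    · have hx' : kf x ∉ a :: s := by
        simp only [List.mem_cons]
        rintro (c | c)
        · exact hxa c
        · exact hx c
      rw [dK_cons, if_neg hx', dK_cons, if_neg hx]
      refine congrArg _ ?_
      have swap : dK l (kf x :: a :: s) = dK l (a :: kf x :: s) :=
        dK_congr_seen (by intro b; simp only [List.mem_cons]; tauto)
      rw [swap, ih htail (kf x :: s)]

lemma dK_append_mem {x : Int × Int × String} :
    ∀ {l : List (Int × Int × String)} {s : List String},
      (kf x ∈ s ∨ ∃ y ∈ l, kf y = kf x) → dK (l ++ [x]) s = dK l s := by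
  intro l
  induction l with
  | nil =>
    intro s h
    rcases h with h | ⟨y, hy, _⟩
    · simp only [List.nil_append]
      rw [dK_cons, if_pos h]
    · simp at hy
  | cons y l ih =>
    intro s h
    rw [List.cons_append]
    by_cases hy : kf y ∈ s
    · rw [dK_cons, if_pos hy, dK_cons, if_pos hy]
      refine ih ?_
      rcases h with h | ⟨y', hy', hk⟩
      · exact Or.inl h
      · rcases List.mem_cons.1 hy' with rfl | hy''
        · exact Or.inl (hk ▸ hy)
        · exact Or.inr ⟨y', hy'', hk⟩
    · rw [dK_cons, if_neg hy, dK_cons, if_neg hy]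
      refine congrArg _ (ih ?_)
      rcases h with h | ⟨y', hy', hk⟩
      · exact Or.inl (List.mem_cons_of_mem _ h)
      · rcases List.mem_cons.1 hy' with rfl | hy''
        · exact Or.inl (by rw [← hk]; exact List.mem_cons_self)
        · exact Or.inr ⟨y', hy'', hk⟩

lemma dK_append_fresh {x : Int × Int × String} :
    ∀ {l : List (Int × Int × String)} {s : List String},
      kf x ∉ s → (∀ y ∈ l, kf y ≠ kf x) → dK (l ++ [x]) s = dK l s ++ [x] := by
  intro l
  induction l with
  | nil =>
    intro s h1 _
    simp only [List.nil_append]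
    rw [dK_cons, if_neg h1, dK_nil, dK_nil, List.nil_append]
  | cons y l ih =>
    intro s h1 h2
    have htail : ∀ z ∈ l, kf z ≠ kf x := fun z hz => h2 z (List.mem_cons_of_mem _ hz)
    rw [List.cons_append]
    by_cases hy : kf y ∈ s
    · rw [dK_cons, if_pos hy, dK_cons, if_pos hy]
      exact ih h1 htail
    · rw [dK_cons, if_neg hy, dK_cons, if_neg hy, List.cons_append]
      refine congrArg _ (ih ?_ htail)
      simp only [List.mem_cons]
      rintro (c | c)
      · exact h2 y List.mem_cons_self c.symm
      · exact h1 c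

lemma dK_insertBy_fresh {x : Int × Int × String} {ys : List (Int × Int × String)}
    (h1 : ∀ y ∈ ys, kf y ≠ kf x) (hso : ys.Pairwise (fun a b => bf b a = false)) :
    ∀ {s : List String}, kf x ∉ s →
      dK (PySem.List.insertBy bf x ys) s = PySem.List.insertBy bf x (dK ys s) := by
  induction ys with
  | nil =>
    intro s h2
    rw [insertBy_nil, dK_nil, insertBy_nil, dK_cons, if_neg h2, dK_nil]
  | cons y ys ih =>
    intro s h2
    rcases List.pairwise_cons.1 hso with ⟨hy, hys⟩
    have h1' : ∀ z ∈ ys, kf z ≠ kf x := fun z hz => h1 z (List.mem_cons_of_mem _ hz)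
    rw [insertBy_cons]
    by_cases hxy : bf x y = true
    · rw [if_pos hxy, dK_cons, if_neg h2, dK_add_fresh h1 s]
      by_cases hyseen : kf y ∈ s
      · -- y is dropped on both sides; x still goes first because the list is sorted
        rw [dK_cons, if_pos hyseen]
        cases hdk : dK ys s with
        | nil => rw [insertBy_nil]
        | cons z zs =>
          have hzdk : z ∈ dK ys s := by rw [hdk]; exact List.mem_cons_self
          have hz : z ∈ ys := dK_mem hzdk
          rw [insertBy_cons, if_pos (bf_lt_of_lt_of_not_lt hxy (hy z hz))]
      · rw [dK_cons, if_neg hyseen, insertBy_cons, if_pos hxy]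
    · rw [if_neg hxy]
      by_cases hyseen : kf y ∈ s
      · conv_lhs => rw [dK_cons, if_pos hyseen]
        rw [dK_cons, if_pos hyseen]
        exact ih h1' hys h2
      · rw [dK_cons, if_neg hyseen, dK_cons, if_neg hyseen, insertBy_cons, if_neg hxy]
        refine congrArg _ ?_
        have h2' : kf x ∉ kf y :: s := by
          simp only [List.mem_cons]
          rintro (c | c)
          · exact h1 y List.mem_cons_self c.symm
          · exact h2 c
        exact ih h1' hys h2'

lemma dK_insertBy_seen {x : Int × Int × String} :
    ∀ (ys : List (Int × Int × String)) (s : List String), kf x ∈ s →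
      dK (PySem.List.insertBy bf x ys) s = dK ys s := by
  intro ys
  induction ys with
  | nil =>
    intro s h
    rw [insertBy_nil, dK_cons, if_pos h]
  | cons y ys ih =>
    intro s h
    rw [insertBy_cons]
    by_cases hxy : bf x y = true
    · rw [if_pos hxy, dK_cons, if_pos h]
    · rw [if_neg hxy]
      by_cases hyseen : kf y ∈ s
      · conv_lhs => rw [dK_cons, if_pos hyseen]
        rw [dK_cons, if_pos hyseen]
        exact ih s h
      · rw [dK_cons, if_neg hyseen, dK_cons, if_neg hyseen]
        exact congrArg _ (ih _ (List.mem_cons_of_mem _ h))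

lemma dK_insertBy_dup {x : Int × Int × String} {ys : List (Int × Int × String)}
    (hsame : ∀ y ∈ ys, kf y = kf x → y.1 = x.1 ∧ y.2.1 = x.2.1)
    (hso : ys.Pairwise (fun a b => bf b a = false)) :
    ∀ {s : List String}, kf x ∉ s → (∃ y ∈ ys, kf y = kf x) →
      dK (PySem.List.insertBy bf x ys) s = dK ys s := by
  induction ys with
  | nil =>
    intro s _ hex
    rcases hex with ⟨y, hy, _⟩
    simp at hy
  | cons y ys ih =>
    intro s hx hex
    rcases List.pairwise_cons.1 hso with ⟨hy, hys⟩
    have hsame' : ∀ z ∈ ys, kf z = kf x → z.1 = x.1 ∧ z.2.1 = x.2.1 :=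
      fun z hz => hsame z (List.mem_cons_of_mem _ hz)
    rw [insertBy_cons]
    by_cases hxy : bf x y = true
    · exfalso
      rcases hex with ⟨y₀, hy₀, hk⟩
      have hcomp := hsame y₀ hy₀ hk
      have hxy₀ : bf x y₀ = false := by
        rw [bf_congr_right hcomp.1 hcomp.2]
        exact bf_self_false rfl rfl
      rcases List.mem_cons.1 hy₀ with rfl | hy₀'
      · rw [hxy₀] at hxy
        exact Bool.false_ne_true hxy
      · have h3 := bf_lt_of_lt_of_not_lt hxy (hy y₀ hy₀')
        rw [hxy₀] at h3
        exact Bool.false_ne_true h3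
    · rw [if_neg hxy]
      by_cases hyseen : kf y ∈ s
      · conv_lhs => rw [dK_cons, if_pos hyseen]
        rw [dK_cons, if_pos hyseen]
        rcases hex with ⟨y₀, hy₀, hk⟩
        rcases List.mem_cons.1 hy₀ with rfl | hy₀'
        · exact absurd (hk ▸ hyseen) hx
        · exact ih hsame' hys hx ⟨y₀, hy₀', hk⟩
      · rw [dK_cons, if_neg hyseen, dK_cons, if_neg hyseen]
        refine congrArg _ ?_
        by_cases hkyx : kf y = kf x
        · exact dK_insertBy_seen ys _ (by rw [← hkyx]; exact List.mem_cons_self)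
        · have hx' : kf x ∉ kf y :: s := by
            simp only [List.mem_cons]
            rintro (c | c)
            · exact hkyx c.symm
            · exact hx c
          rcases hex with ⟨y₀, hy₀, hk⟩
          rcases List.mem_cons.1 hy₀ with rfl | hy₀'
          · exact absurd hk hkyx
          · exact ih hsame' hys hx' ⟨y₀, hy₀', hk⟩

-- MAIN commutation: dedup after a stable sort = stable sort of the dedup
lemma dK_sortF_comm (xs : List (Int × Int × String))
    (hsame : ∀ x ∈ xs, ∀ y ∈ xs, kf x = kf y → x.1 = y.1 ∧ x.2.1 = y.2.1) :
    dK (sortF xs) [] = sortF (dK xs []) := by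
  induction xs using List.reverseRecOn with
  | nil => rfl
  | append_singleton xs x ih =>
    have hsub : ∀ z ∈ xs, z ∈ xs ++ [x] := fun z hz => List.mem_append_left _ hz
    have hsame' : ∀ a ∈ xs, ∀ b ∈ xs, kf a = kf b → a.1 = b.1 ∧ a.2.1 = b.2.1 :=
      fun a ha b hb => hsame a (hsub a ha) b (hsub b hb)
    rw [sortF_append]
    by_cases hdup : ∃ y ∈ xs, kf y = kf x
    · have e1 : dK (xs ++ [x]) [] = dK xs [] := dK_append_mem (Or.inr hdup)
      have hex : ∃ y ∈ sortF xs, kf y = kf x := by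
        rcases hdup with ⟨y, hy, hk⟩
        exact ⟨y, mem_sortF.2 hy, hk⟩
      have e2 : dK (PySem.List.insertBy bf x (sortF xs)) [] = dK (sortF xs) [] := by
        refine dK_insertBy_dup ?_ (sortF_pairwise xs) (by simp) hex
        intro y hy hk
        exact hsame y (hsub y (mem_sortF.1 hy)) x (List.mem_append_right _ List.mem_cons_self) hk
      rw [e2, ih hsame', e1]
    · have hdup' : ∀ y ∈ xs, kf y ≠ kf x := fun y hy hk => hdup ⟨y, hy, hk⟩
      have e1 : dK (xs ++ [x]) [] = dK xs [] ++ [x] :=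
        dK_append_fresh (by simp) hdup'
      have e2 : dK (PySem.List.insertBy bf x (sortF xs)) [] =
          PySem.List.insertBy bf x (dK (sortF xs) []) :=
        dK_insertBy_fresh (fun y hy => hdup' y (mem_sortF.1 hy)) (sortF_pairwise xs) (by simp)
      rw [e2, ih hsame', e1, sortF_append]

-- A's emission loop over any list = pickB_loop over its key-dedup
lemma pickA_loop_eq_pickB_loop (ys : List (Int × Int × String)) :
    ∀ (seen : PySem.Set String) (seenL : List String) (chosen : List String) (limit : Int),
      (∀ a, PySem.Set.contains seen a = true ↔ a ∈ seenL) →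
      pickA_loop ys seen chosen limit = pickB_loop (dK ys seenL) chosen limit := by
  induction ys with
  | nil => intro seen seenL chosen limit _; rfl
  | cons x ys ih =>
    intro seen seenL chosen limit hinv
    obtain ⟨p, q, s⟩ := x
    have hkf : kf (p, q, s) = PySem.Str.lower s := rfl
    by_cases hc : PySem.Set.contains seen (PySem.Str.lower s) = true
    · rw [pickA_loop, if_pos hc, dK_cons, hkf, if_pos ((hinv _).1 hc)]
      exact ih seen seenL chosen limit hinv
    · rw [pickA_loop, if_neg hc, dK_cons, hkf, if_neg (fun m => hc ((hinv _).2 m)), pickB_loop]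
      by_cases hl : limit ≤ ((chosen ++ [s]).length : Int)
      · simp only [hl, if_true]
      · simp only [hl, if_false]
        refine ih _ _ _ _ ?_
        intro a
        have hmem : a ∈ PySem.Set.add seen (PySem.Str.lower s) ↔
            a ∈ seen ∨ a = PySem.Str.lower s := PySem.Set.mem_add seen _ a
        simp only [PySem.Set.contains, List.contains_iff_mem] at hinv ⊢
        rw [hmem, List.mem_cons]
        constructor
        · rintro (h | rfl)
          · exact Or.inr ((hinv a).1 (by simpa [List.contains_iff_mem] using h))
          · exact Or.inl rfl
        · rintro (rfl | h)
          · exact Or.inr rfl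
          · exact Or.inl (by simpa [List.contains_iff_mem] using (hinv a).2 h)

-- B's dedup-and-score pass = key-dedup of A's scored list
lemma scan_eq_dK (terms : List String) (l : List String) :
    ∀ (seen : PySem.Set String) (pool : List (Int × Int × String)) (seenL : List String),
      (∀ a, PySem.Set.contains seen a = true ↔ a ∈ seenL) →
      (l.foldl (fun (st : PySem.Set String × List (Int × Int × String)) s =>
          if PySem.Set.contains st.1 (PySem.Str.lower s) then st
          else (PySem.Set.add st.1 (PySem.Str.lower s), st.2 ++ [tupOf terms s]))
        (seen, pool)).2 = pool ++ dK (l.map (tupOf terms)) seenL := by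
  induction l with
  | nil => intro seen pool seenL _; simp [dK_nil]
  | cons s l ih =>
    intro seen pool seenL hinv
    have hkf : kf (tupOf terms s) = PySem.Str.lower s := rfl
    simp only [List.foldl_cons, List.map_cons]
    by_cases hc : PySem.Set.contains seen (PySem.Str.lower s) = true
    · rw [dK_cons, hkf, if_pos ((hinv _).1 hc), if_pos hc]
      exact ih seen pool seenL hinv
    · rw [dK_cons, hkf, if_neg (fun m => hc ((hinv _).2 m)), if_neg hc]
      have hinv' : ∀ a, PySem.Set.contains (PySem.Set.add seen (PySem.Str.lower s)) a = true ↔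
          a ∈ PySem.Str.lower s :: seenL := by
        intro a
        have hmem : a ∈ PySem.Set.add seen (PySem.Str.lower s) ↔
            a ∈ seen ∨ a = PySem.Str.lower s := PySem.Set.mem_add seen _ a
        simp only [PySem.Set.contains, List.contains_iff_mem] at hinv ⊢
        rw [hmem, List.mem_cons]
        constructor
        · rintro (h | rfl)
          · exact Or.inr ((hinv a).1 (by simpa [List.contains_iff_mem] using h))
          · exact Or.inl rfl
        · rintro (rfl | h)
          · exact Or.inr rfl
          · exact Or.inl (by simpa [List.contains_iff_mem] using (hinv a).2 h)
      rw [ih _ _ _ hinv', List.append_assoc]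
      rfl

-- lowercasing preserves length, so equal keys force equal scored components
lemma tup_same (terms : List String) (s s' : String)
    (h : PySem.Str.lower s = PySem.Str.lower s') :
    (tupOf terms s).1 = (tupOf terms s').1 ∧ (tupOf terms s).2.1 = (tupOf terms s').2.1 := by
  constructor
  · simp only [tupOf, h]
  · have hl : s.toList.length = s'.toList.length := by
      have h1 := congrArg String.toList h
      rw [PySem.Str.toList_lower, PySem.Str.toList_lower] at h1
      have h2 := congrArg List.length h1
      simpa [PySem.Chars.lower] using h2
    simp only [tupOf, PySem.Str.len_eq, hl]

-- ===== selection = stable sort =====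

-- the scanned first minimum under bf
def fmin (x : Int × Int × String) (xs : List (Int × Int × String)) : Int × Int × String :=
  xs.foldl (fun b y => if bf y b then y else b) x

def fminL : List (Int × Int × String) → Int × Int × String
  | [] => (0, 0, "")
  | x :: xs => fmin x xs

lemma fmin_eq_pyMin (xs : List (Int × Int × String)) (x : Int × Int × String) :
    xs.foldl (fun b y => if pyLt2 y b then y else b) x = fmin x xs := by
  unfold fmin
  have : (fun (b y : Int × Int × String) => if pyLt2 y b then y else b)
      = (fun b y => if bf y b then y else b) := by
    funext b y
    rw [pyLt2_eq_bf]
  rw [this]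

lemma fmin_cons (x y : Int × Int × String) (ys : List (Int × Int × String)) :
    fmin x (y :: ys) = fmin (if bf y x then y else x) ys := rfl

lemma fmin_mem : ∀ (xs : List (Int × Int × String)) (x : Int × Int × String),
    fmin x xs ∈ x :: xs := by
  intro xs
  induction xs with
  | nil => intro x; simp [fmin]
  | cons y ys ih =>
    intro x
    rw [fmin_cons]
    by_cases h : bf y x = true
    · rw [if_pos h]
      rcases List.mem_cons.1 (ih y) with h' | h'
      · rw [h']; exact List.mem_cons_of_mem _ List.mem_cons_self
      · exact List.mem_cons_of_mem _ (List.mem_cons_of_mem _ h')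
    · rw [if_neg h]
      rcases List.mem_cons.1 (ih x) with h' | h'
      · rw [h']; exact List.mem_cons_self
      · exact List.mem_cons_of_mem _ (List.mem_cons_of_mem _ h')

lemma fmin_not_lt : ∀ (xs : List (Int × Int × String)) (x : Int × Int × String),
    ∀ z ∈ x :: xs, bf z (fmin x xs) = false := by
  intro xs
  induction xs with
  | nil =>
    intro x z hz
    rcases List.mem_cons.1 hz with rfl | h
    · exact bf_self_false rfl rfl
    · simp at h
  | cons y ys ih =>
    intro x z hz
    rw [fmin_cons]
    by_cases h : bf y x = true
    · rw [if_pos h]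
      rcases List.mem_cons.1 hz with rfl | hz'
      · -- z = x: if z < fmin then y < fmin by transitivity with y < x, contradiction
        by_cases hc : bf z (fmin y ys) = true
        · exfalso
          have := bf_trans h hc
          rw [ih y y List.mem_cons_self] at this
          exact Bool.false_ne_true this
        · simpa using hc
      · exact ih y z hz'
    · rw [if_neg h]
      rcases List.mem_cons.1 hz with rfl | hz'
      · exact ih z z List.mem_cons_self
      · rcases List.mem_cons.1 hz' with rfl | hz''
        · -- z = y: if y < fmin then, since ¬(x < fmin), y < x — contradiction
          by_cases hc : bf z (fmin x ys) = true
          · exfalso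
            have hx : bf x (fmin x ys) = false := ih x x List.mem_cons_self
            have := bf_lt_of_lt_of_not_lt hc hx
            rw [this] at h
            exact h rfl
          · simpa using hc
        · exact ih x z (List.mem_cons_of_mem _ hz'')

lemma fminL_mem {l : List (Int × Int × String)} (h : l ≠ []) : fminL l ∈ l := by
  cases l with
  | nil => exact absurd rfl h
  | cons x xs => exact fmin_mem xs x

lemma fminL_not_lt {l : List (Int × Int × String)} (h : l ≠ []) :
    ∀ z ∈ l, bf z (fminL l) = false := by
  cases l with
  | nil => exact absurd rfl h
  | cons x xs => exact fmin_not_lt xs x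

lemma fminL_append {l : List (Int × Int × String)} (h : l ≠ [])
    (y : Int × Int × String) :
    fminL (l ++ [y]) = if bf y (fminL l) then y else fminL l := by
  cases l with
  | nil => exact absurd rfl h
  | cons x xs =>
    show fmin x (xs ++ [y]) = _
    unfold fmin
    rw [List.foldl_append]
    rfl

-- head of the stable insertion sort = first minimum; tail = sort of the pool minus it
lemma sortF_min_cons : ∀ (l : List (Int × Int × String)), l ≠ [] →
    sortF l = fminL l :: sortF (l.erase (fminL l)) := by
  intro l
  induction l using List.reverseRecOn with
  | nil => intro h; exact absurd rfl h
  | append_singleton l y ih =>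
    intro _
    rcases eq_or_ne l [] with rfl | hl
    · simp only [List.nil_append]
      show sortF [y] = fminL [y] :: sortF ([y].erase (fminL [y]))
      have h1 : fminL [y] = y := rfl
      rw [h1, List.erase_cons_head]
      rfl
    · have hm := ih hl
      rw [sortF_append, hm, insertBy_cons, fminL_append hl y]
      by_cases hc : bf y (fminL l) = true
      · rw [if_pos hc, if_pos hc]
        have hy_notin : y ∉ l := by
          intro hmem
          have := fminL_not_lt hl y hmem
          rw [this] at hc
          exact Bool.false_ne_true hc
        have herase : (l ++ [y]).erase y = l := by
          rw [List.erase_append_right _ hy_notin, List.erase_cons_head, List.append_nil]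
        rw [herase, hm]
      · rw [if_neg hc, if_neg hc]
        have herase : (l ++ [y]).erase (fminL l) = l.erase (fminL l) ++ [y] :=
          List.erase_append_left _ (fminL_mem hl)
        rw [herase, sortF_append]

-- pickB_loop on a cons cell, without needing a literal tuple pattern
lemma pickB_loop_cons (m : Int × Int × String) (rest : List (Int × Int × String))
    (chosen : List String) (limit : Int) :
    pickB_loop (m :: rest) chosen limit =
      if limit ≤ ((chosen ++ [m.2.2]).length : Int) then chosen ++ [m.2.2]
      else pickB_loop rest (chosen ++ [m.2.2]) limit := by
  obtain ⟨a, b, s⟩ := m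
  rfl

-- B's selection loop = A-style emission over the stable sort
lemma selLoopB_eq_pickB_loop : ∀ (n : Nat) (pool : List (Int × Int × String)),
    pool.length ≤ n → ∀ (chosen : List String) (limit : Int),
      selLoopB pool chosen limit = pickB_loop (sortF pool) chosen limit := by
  intro n
  induction n with
  | zero =>
    intro pool hlen chosen limit
    cases pool with
    | nil => rw [selLoopB]; rfl
    | cons x xs => simp at hlen
  | succ n ih =>
    intro pool hlen chosen limit
    cases pool with
    | nil => rw [selLoopB]; rfl
    | cons x xs =>
      have hne : (x :: xs : List (Int × Int × String)) ≠ [] := by simp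
      have hfm : (x :: xs).foldl (fun b y => if pyLt2 y b then y else b) x = fminL (x :: xs) := by
        rw [fmin_eq_pyMin]
        show fmin x (x :: xs) = fmin x xs
        rw [fmin_cons, bf_self_false rfl rfl]
        simp
      have hmem : fminL (x :: xs) ∈ x :: xs := fminL_mem hne
      have hlen' : ((x :: xs).erase (fminL (x :: xs))).length ≤ n := by
        rw [List.length_erase_of_mem hmem]
        simp only [List.length_cons] at hlen ⊢
        omega
      rw [selLoopB, hfm, sortF_min_cons _ hne, pickB_loop_cons]
      by_cases hl : limit ≤ ((chosen ++ [(fminL (x :: xs)).2.2]).length : Int)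
      · rw [if_pos hl, if_pos hl]
      · rw [if_neg hl, if_neg hl]
        exact ih _ hlen' _ _

-- ===== VERDICT (by name: the statement is the Claim_ definition above) =====
theorem pick_sentences_spec : Claim_equal_pick_sentences := by
  intro sentences terms limit _
  unfold Spec_pick_sentences
  have hA0 : pick_sentences sentences terms limit
      = pickA_loop (PySem.List.sorted2 (sentences.foldl (fun acc s => acc ++ [tupOf terms s]) [])
          (fun x => -x.1) (fun x => x.2.1)) PySem.Set.empty [] limit := rfl
  have hB0 : pick_sentences_alt sentences terms limit
      = selLoopB ((sentences.foldl (fun (st : PySem.Set String × List (Int × Int × String)) s =>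
          if PySem.Set.contains st.1 (PySem.Str.lower s) then st
          else (PySem.Set.add st.1 (PySem.Str.lower s), st.2 ++ [tupOf terms s]))
        (PySem.Set.empty, [])).2) [] limit := rfl
  rw [hA0, hB0, PySem.List.foldl_append_singleton_eq_map, List.nil_append, sorted2_eq_sortF]
  have hsame : ∀ x ∈ sentences.map (tupOf terms), ∀ y ∈ sentences.map (tupOf terms),
      kf x = kf y → x.1 = y.1 ∧ x.2.1 = y.2.1 := by
    intro x hx y hy hk
    rcases List.mem_map.1 hx with ⟨s, _, rfl⟩
    rcases List.mem_map.1 hy with ⟨s', _, rfl⟩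
    exact tup_same terms s s' hk
  have hscan : ((sentences.foldl (fun (st : PySem.Set String × List (Int × Int × String)) s =>
          if PySem.Set.contains st.1 (PySem.Str.lower s) then st
          else (PySem.Set.add st.1 (PySem.Str.lower s), st.2 ++ [tupOf terms s]))
        (PySem.Set.empty, [])).2) = dK (sentences.map (tupOf terms)) [] := by
    have h0 := scan_eq_dK terms sentences PySem.Set.empty [] []
      (by intro a; simp [PySem.Set.contains, PySem.Set.empty])
    simpa using h0
  rw [hscan, selLoopB_eq_pickB_loop (dK (sentences.map (tupOf terms)) []).length _ le_rfl,
    ← dK_sortF_comm _ hsame]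
  exact pickA_loop_eq_pickB_loop _ _ _ _ _
    (by intro a; simp [PySem.Set.contains, PySem.Set.empty])
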